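-- pv_equiv track=rewrite | github.com/nils-soderman/pyfbsdk-stub-generator | mobu_stub_generator/stub_generator.py | _PatchDocStringGeneric
-- ===== SOURCE A (Python) =====
-- TAB_CHARACTER = "    "
--
-- def _PatchDocStringGeneric(Docstring: str):
--     NewDocString = ""
--     CodeLines = 0
--     UnderTitle = None
--     bParsingCode = False
--
--
--     for Line in Docstring.split("\n"):
--         Line = Line.strip()
--
--         # Remove all 'Definition at line x' lines.
--         if Line.startswith("Definition at line"):
--             continue
--
--         # Check if we're entering a codeblock
--         if Line == "@CODE":
--             bParsingCode = True
--             CodeLines = 0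
--             continue
--
--         # Check if we're exiting a code block
--         elif bParsingCode and Line == "@ENDCODE":
--             bParsingCode = False
--             Line = ""
--
--         if bParsingCode:
--             Line = Line.replace("\\n", "\\\\n")
--             if CodeLines == 0:
--                 Line = "\n>>> %s" % Line
--             else:
--                 # Switch to 4 spaces as tabs, instead of 2 spaces.
--                 NumberOfTabs = int((len(Line) - len(Line.lstrip())) / 2)
--                 Line = (TAB_CHARACTER * NumberOfTabs) + Line.lstrip()
--             CodeLines += 1
--
--         else:
--             if Line.startswith("#"):
--                 Line = Line.partition(" ")[2]
--                 UnderTitle = Line.lower()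
--                 Line = "### %s:" % Line
--
--         NewDocString += "%s\n" % Line
--
--     # Remove double spaces
--     NewDocString = NewDocString.replace("  ", " ")
--     NewDocString = NewDocString.replace("\"", "'")
--
--     return NewDocString.strip()
-- ===== SOURCE B (Python) =====
-- TAB_CHARACTER = "    "
--
--
-- def _format_code_segment(code_lines, closed):
--     """Format one @CODE…@ENDCODE run; `closed` means an @ENDCODE was seen."""
--     out = []
--     for k, line in enumerate(code_lines):
--         line = line.replace("\\n", "\\\\n")
--         if k == 0:
--             out.append("\n>>> %s" % line)
--         else:
--             # lines were stripped, so the 2-space-indent conversion is identity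
--             out.append(line)
--     if closed:
--         out.append("")  # the blank line the @ENDCODE marker turns into
--     return out
--
--
-- def _format_text_segment(text_lines):
--     out = []
--     for line in text_lines:
--         if line.startswith("#"):
--             out.append("### %s:" % line.partition(" ")[2])
--         else:
--             out.append(line)
--     return out
--
--
-- def _PatchDocStringGeneric(Docstring: str):
--     lines = [l.strip() for l in Docstring.split("\n")]
--     lines = [l for l in lines if not l.startswith("Definition at line")]
--
--     # One pass: split into alternating text runs and code runs.
--     out = []
--     i, n = 0, len(lines)
--     while i < n:
--         if lines[i] == "@CODE":
--             i += 1
--             code = []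
--             while i < n and lines[i] != "@CODE" and lines[i] != "@ENDCODE":
--                 code.append(lines[i])
--                 i += 1
--             closed = i < n and lines[i] == "@ENDCODE"
--             if closed:
--                 i += 1
--             out.extend(_format_code_segment(code, closed))
--         else:
--             text = []
--             while i < n and lines[i] != "@CODE":
--                 text.append(lines[i])
--                 i += 1
--             out.extend(_format_text_segment(text))
--
--     s = "\n".join(out)
--     s = s.replace("  ", " ")
--     s = s.replace("\"", "'")
--     return s.strip()
-- ===== Notes on version B (the rewrite author's own statement) =====
-- stated objective: alternative
-- what changed: A's single stateful line loop (mode flag + per-block counter) is replaced by a segmentation pass that splits the stripped, filtered lines into alternating text runs and @CODE..@ENDCODE code runs, each formatted by its own helper and then joined.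
import Mathlib
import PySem

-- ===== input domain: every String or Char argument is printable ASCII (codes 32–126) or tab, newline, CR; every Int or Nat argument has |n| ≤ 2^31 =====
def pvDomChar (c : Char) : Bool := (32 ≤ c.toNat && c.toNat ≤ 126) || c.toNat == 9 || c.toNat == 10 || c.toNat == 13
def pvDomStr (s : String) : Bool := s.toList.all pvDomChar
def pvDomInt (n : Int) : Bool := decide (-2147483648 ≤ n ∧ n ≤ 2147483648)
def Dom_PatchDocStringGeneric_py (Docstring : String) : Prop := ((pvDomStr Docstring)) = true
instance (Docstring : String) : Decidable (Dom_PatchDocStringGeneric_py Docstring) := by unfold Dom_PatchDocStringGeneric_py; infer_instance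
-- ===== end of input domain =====

-- B rebuilds the docstring by first splitting the (stripped, filtered) lines into alternating
-- text runs and @CODE…@ENDCODE runs and formatting each run with its own helper, instead of A's
-- single stateful line loop; same return value, different decomposition (no speed claim).

-- ===== PORT A =====
-- module constant: the "Definition at line" prefix (shared by both ports, like the Python literal)
def pvDefPrefix : List Char := "Definition at line".toList

-- port of Line.partition(" ")[2] (exact for the one-character separator " ")
def pvPartitionAfterSpace (s : List Char) : List Char :=
  let i := PySem.Chars.find s [' ']
  if i = -1 then [] else s.drop (i.toNat + 1)

-- one iteration of A's `for Line in Docstring.split("\n")` loop;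
-- state = (NewDocString, CodeLines, UnderTitle, bParsingCode)
def pvAStep (st : List Char × Int × Option (List Char) × Bool) (rawLine : List Char) :
    List Char × Int × Option (List Char) × Bool :=
  match st with
  | (nd, codeLines, underTitle, parsing) =>
    let line := PySem.Chars.strip rawLine
    if PySem.Chars.startswith line pvDefPrefix then (nd, codeLines, underTitle, parsing)
    else if line = "@CODE".toList then (nd, 0, underTitle, true)
    else
      let lp : List Char × Bool :=
        if parsing = true ∧ line = "@ENDCODE".toList then ([], false) else (line, parsing)
      if lp.2 = true then
        let line1 := PySem.Chars.replace lp.1 "\\n".toList "\\\\n".toList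
        let line2 :=
          if codeLines = 0 then '\n' :: (">>> ".toList ++ line1)
          else
            -- int((len(Line) - len(Line.lstrip())) / 2): nonnegative, so int() of the float quotient is truncating division
            let numberOfTabs := PySem.Int.truncdiv ((PySem.Chars.len line1) - (PySem.Chars.len (PySem.Chars.lstrip line1))) 2
            PySem.List.pyRepeat "    ".toList numberOfTabs ++ PySem.Chars.lstrip line1
        (nd ++ line2 ++ ['\n'], codeLines + 1, underTitle, lp.2)
      else
        let tl : List Char × Option (List Char) :=
          if PySem.Chars.startswith lp.1 ['#'] then
            let t := pvPartitionAfterSpace lp.1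
            ("### ".toList ++ t ++ [':'], some (PySem.Chars.lower t))
          else (lp.1, underTitle)
        (nd ++ tl.1 ++ ['\n'], codeLines, tl.2, lp.2)

def PatchDocStringGeneric_py (Docstring : String) : String :=
  let st := (PySem.Chars.splitOn Docstring.toList "\n".toList).foldl pvAStep ([], 0, none, false)
  let nd := PySem.Chars.replace st.1 "  ".toList " ".toList
  let nd2 := PySem.Chars.replace nd ['"'] ['\'']
  String.ofList (PySem.Chars.strip nd2)

-- ===== PORT B =====
-- _format_code_segment: enumerate-and-format one code run, plus the blank line @ENDCODE turns into
def pvFmtCodeLine (kl : Int × List Char) : List Char :=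
  let line := PySem.Chars.replace kl.2 "\\n".toList "\\\\n".toList
  if kl.1 = 0 then '\n' :: (">>> ".toList ++ line) else line

def pvFmtCode (code : List (List Char)) (closed : Bool) : List (List Char) :=
  (PySem.List.enumerate code).map pvFmtCodeLine ++ (if closed then [[]] else [])

-- _format_text_segment
def pvFmtTextLine (l : List Char) : List Char :=
  if PySem.Chars.startswith l ['#'] then "### ".toList ++ pvPartitionAfterSpace l ++ [':'] else l

def pvFmtText (text : List (List Char)) : List (List Char) := text.map pvFmtTextLine

-- the segmentation while-loop of Source B, as mutual structural recursion over the line list: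
-- pvGo = the outer loop, pvCode/pvText = the inner run-collecting loops (acc = the current run)
mutual
def pvGo : List (List Char) → List (List Char)
  | [] => []
  | l :: rest => if l = "@CODE".toList then pvCode rest [] else pvText rest [l]
  termination_by ls => ls.length

def pvCode : List (List Char) → List (List Char) → List (List Char)
  | [], acc => pvFmtCode acc false
  | l :: rest, acc =>
    if l = "@CODE".toList then pvFmtCode acc false ++ pvCode rest []
    else if l = "@ENDCODE".toList then pvFmtCode acc true ++ pvGo rest
    else pvCode rest (acc ++ [l])
  termination_by ls _ => ls.length

def pvText : List (List Char) → List (List Char) → List (List Char)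
  | [], acc => pvFmtText acc
  | l :: rest, acc =>
    if l = "@CODE".toList then pvFmtText acc ++ pvCode rest []
    else pvText rest (acc ++ [l])
  termination_by ls _ => ls.length
end

def PatchDocStringGeneric_py_alt (Docstring : String) : String :=
  let lines := (PySem.Chars.splitOn Docstring.toList "\n".toList).map PySem.Chars.strip
  let lines2 := lines.filter (fun l => !PySem.Chars.startswith l pvDefPrefix)
  let out := pvGo lines2
  let s := PySem.Chars.join [] (out.map (fun l => l ++ ['\n']))
  let s2 := PySem.Chars.replace s "  ".toList " ".toList
  let s3 := PySem.Chars.replace s2 ['"'] ['\'']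
  String.ofList (PySem.Chars.strip s3)

-- ===== PRECONDITION & SPEC =====
def Spec_PatchDocStringGeneric_py (Docstring : String) (out : String) : Prop := out = PatchDocStringGeneric_py_alt Docstring
instance (Docstring : String) (out : String) : Decidable (Spec_PatchDocStringGeneric_py Docstring out) := by unfold Spec_PatchDocStringGeneric_py; infer_instance

-- ===== CLAIM (what is proved, stated in full; the proofs are below) =====
def Claim_equal_PatchDocStringGeneric_py : Prop := ∀ (Docstring : String), Dom_PatchDocStringGeneric_py Docstring → Spec_PatchDocStringGeneric_py Docstring (PatchDocStringGeneric_py Docstring)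

-- ===== LEMMAS AND PROOFS =====

-- proof-side abbreviations
def pvKeep (l : List Char) : Bool := !PySem.Chars.startswith l pvDefPrefix
def pvFlat (out : List (List Char)) : List Char := (out.map (fun l => l ++ ['\n'])).flatten

lemma pv_dropWhile_idem (p : Char → Bool) : ∀ s : List Char,
    List.dropWhile p (List.dropWhile p s) = List.dropWhile p s
  | [] => rfl
  | c :: t => by
    by_cases h : p c
    · simp only [List.dropWhile_cons, h, if_true]
      exact pv_dropWhile_idem p t
    · simp [List.dropWhile_cons, h]

lemma pv_dropWhile_prefix (p : Char → Bool) {u t : List Char} (hp : u <+: t)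
    (ht : List.dropWhile p t = t) : List.dropWhile p u = u := by
  cases u with
  | nil => rfl
  | cons c u' =>
    obtain ⟨r, rfl⟩ := hp
    rw [List.cons_append, List.dropWhile_cons] at ht
    by_cases h : p c
    · exfalso
      rw [if_pos h] at ht
      have h1 := List.length_dropWhile_le p (u' ++ r)
      have h2 := congrArg List.length ht
      simp only [List.length_append, List.length_cons] at h1 h2
      omega
    · simp [List.dropWhile_cons, h]

lemma pv_rstrip_prefix (l : List Char) : PySem.Chars.rstrip l <+: l := by
  have h : List.dropWhile PySem.Chars.isspace l.reverse <:+ l.reverse :=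
    List.dropWhile_suffix _
  have h2 := List.reverse_prefix.mpr h
  rw [List.reverse_reverse] at h2
  exact h2

lemma pv_lstrip_idem (s : List Char) :
    PySem.Chars.lstrip (PySem.Chars.lstrip s) = PySem.Chars.lstrip s := by
  simp only [PySem.Chars.lstrip]
  exact pv_dropWhile_idem _ s

lemma pv_lstrip_prefix_self {u t : List Char} (hp : u <+: t)
    (ht : PySem.Chars.lstrip t = t) : PySem.Chars.lstrip u = u := by
  simp only [PySem.Chars.lstrip] at *
  exact pv_dropWhile_prefix _ hp ht

lemma pv_lstrip_strip (s : List Char) :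
    PySem.Chars.lstrip (PySem.Chars.strip s) = PySem.Chars.strip s := by
  simp only [PySem.Chars.strip]
  exact pv_lstrip_prefix_self (pv_rstrip_prefix _) (pv_lstrip_idem s)

lemma pv_rstrip_idem (s : List Char) :
    PySem.Chars.rstrip (PySem.Chars.rstrip s) = PySem.Chars.rstrip s := by
  simp only [PySem.Chars.rstrip, List.reverse_reverse]
  rw [pv_dropWhile_idem]

lemma pv_strip_idem (s : List Char) :
    PySem.Chars.strip (PySem.Chars.strip s) = PySem.Chars.strip s := by
  have h := pv_lstrip_strip s
  calc PySem.Chars.strip (PySem.Chars.strip s)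
      = PySem.Chars.rstrip (PySem.Chars.lstrip (PySem.Chars.strip s)) := rfl
    _ = PySem.Chars.rstrip (PySem.Chars.strip s) := by rw [h]
    _ = PySem.Chars.rstrip (PySem.Chars.rstrip (PySem.Chars.lstrip s)) := rfl
    _ = PySem.Chars.rstrip (PySem.Chars.lstrip s) := pv_rstrip_idem _
    _ = PySem.Chars.strip s := rfl

lemma pv_lstrip_of_strip {l : List Char} (h : PySem.Chars.strip l = l) :
    PySem.Chars.lstrip l = l := by
  have hsuf : PySem.Chars.lstrip l <:+ l := by
    simp only [PySem.Chars.lstrip]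
    exact List.dropWhile_suffix _
  have hpre : PySem.Chars.strip l <+: PySem.Chars.lstrip l := pv_rstrip_prefix _
  have h1 := hpre.length_le
  have h2 := hsuf.length_le
  have h3 : (PySem.Chars.strip l).length = l.length := by rw [h]
  exact hsuf.eq_of_length (by omega)

lemma pvAStep_strip (st : List Char × Int × Option (List Char) × Bool) (l : List Char) :
    pvAStep st (PySem.Chars.strip l) = pvAStep st l := by
  obtain ⟨nd, cl, ut, pr⟩ := st
  simp only [pvAStep, pv_strip_idem]

lemma pv_go_acc (old new : List Char) : ∀ (fuel : Nat) (l acc : List Char),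
    PySem.Chars.replace.go old new fuel l acc
      = acc.reverse ++ PySem.Chars.replace.go old new fuel l [] := by
  intro fuel
  induction fuel with
  | zero => intro l acc; simp [PySem.Chars.replace.go]
  | succ f ih =>
    intro l acc
    cases l with
    | nil => simp [PySem.Chars.replace.go]
    | cons c t =>
      rw [PySem.Chars.replace.go, PySem.Chars.replace.go]
      by_cases h : old.isPrefixOf (c :: t)
      · rw [if_pos h, if_pos h, ih _ (new.reverse ++ acc), ih _ (new.reverse ++ [])]
        simp
      · rw [if_neg h, if_neg h, ih _ (c :: acc), ih _ [c]]
        simp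

lemma pv_replace_lstrip {l : List Char} (h : PySem.Chars.lstrip l = l) :
    PySem.Chars.lstrip (PySem.Chars.replace l "\\n".toList "\\\\n".toList)
      = PySem.Chars.replace l "\\n".toList "\\\\n".toList := by
  rw [PySem.Chars.replace]
  rw [if_neg (by decide)]
  cases l with
  | nil => simp [PySem.Chars.replace.go, PySem.Chars.lstrip]
  | cons c t =>
    have hc : PySem.Chars.isspace c = false := by
      simp only [PySem.Chars.lstrip, List.dropWhile_cons] at h
      by_cases hp : PySem.Chars.isspace c
      · rw [if_pos hp] at h
        have h1 := List.length_dropWhile_le PySem.Chars.isspace t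
        have h2 := congrArg List.length h
        simp at h2
        omega
      · simpa using hp
    rw [show (c :: t).length = t.length + 1 from rfl, PySem.Chars.replace.go]
    by_cases hpre : ("\\n".toList).isPrefixOf (c :: t)
    · rw [if_pos hpre, pv_go_acc]
      simp [PySem.Chars.lstrip, List.dropWhile_cons,
        show PySem.Chars.isspace '\\' = false from by decide]
    · rw [if_neg hpre, pv_go_acc]
      simp [PySem.Chars.lstrip, List.dropWhile_cons, hc]

lemma pv_join_nil (ps : List (List Char)) : PySem.Chars.join [] ps = ps.flatten := by
  simp only [PySem.Chars.join, List.intercalate]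
  induction ps with
  | nil => rfl
  | cons a t ih =>
    cases t with
    | nil => simp
    | cons b t2 =>
      rw [show List.intersperse ([] : List Char) (a :: b :: t2)
            = a :: [] :: List.intersperse [] (b :: t2) from rfl]
      simp only [List.flatten_cons] at *
      rw [ih]
      simp

lemma pvFlat_nil : pvFlat [] = [] := rfl

lemma pvFlat_single (x : List Char) : pvFlat [x] = x ++ ['\n'] := by
  simp [pvFlat]

lemma pvFlat_append (a b : List (List Char)) : pvFlat (a ++ b) = pvFlat a ++ pvFlat b := by
  simp [pvFlat]

lemma pvFmtCode_nil_false : pvFmtCode [] false = [] := by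
  simp [pvFmtCode, PySem.List.enumerate_nil]

lemma pvFmtCode_true (acc : List (List Char)) :
    pvFmtCode acc true = pvFmtCode acc false ++ [[]] := by
  simp [pvFmtCode]

lemma pvFmtCode_snoc (acc : List (List Char)) (l : List Char) :
    pvFmtCode (acc ++ [l]) false
      = pvFmtCode acc false ++ [pvFmtCodeLine ((acc.length : Int), l)] := by
  simp [pvFmtCode, PySem.List.enumerate_append, PySem.List.enumerate_cons,
    PySem.List.enumerate_nil]

lemma pvFmtText_nil : pvFmtText [] = [] := rfl

lemma pvFmtText_snoc (acc : List (List Char)) (l : List Char) :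
    pvFmtText (acc ++ [l]) = pvFmtText acc ++ [pvFmtTextLine l] := by
  simp [pvFmtText]

lemma pvGo_eq_text (ls : List (List Char)) : pvGo ls = pvText ls [] := by
  cases ls with
  | nil => simp [pvGo, pvText, pvFmtText]
  | cons l rest =>
    by_cases h : l = "@CODE".toList
    · simp [pvGo, pvText, pvFmtText, h]
    · have h' : l ≠ ['@', 'C', 'O', 'D', 'E'] := by simpa using h
      simp [pvGo, pvText, pvFmtText, h']

-- step lemmas: how one iteration of A's loop acts on an already-stripped line
lemma pvStep_skip {l : List Char} (hsl : PySem.Chars.strip l = l)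
    (hdef : PySem.Chars.startswith l pvDefPrefix = true)
    (st : List Char × Int × Option (List Char) × Bool) : pvAStep st l = st := by
  obtain ⟨nd, cl, ut, pr⟩ := st
  simp [pvAStep, hsl, hdef]

lemma pvStep_code_enter {l : List Char} (hsl : PySem.Chars.strip l = l)
    (hc : l = "@CODE".toList) (nd : List Char) (cl : Int) (ut : Option (List Char)) (pr : Bool) :
    pvAStep (nd, cl, ut, pr) l = (nd, 0, ut, true) := by
  subst hc
  have hs : PySem.Chars.strip ['@', 'C', 'O', 'D', 'E'] = ['@', 'C', 'O', 'D', 'E'] := by decide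
  have h1 : PySem.Chars.startswith ['@', 'C', 'O', 'D', 'E'] pvDefPrefix = false := by decide
  simp [pvAStep, hs, h1]

lemma pvStep_endcode {l : List Char} (hsl : PySem.Chars.strip l = l)
    (he : l = "@ENDCODE".toList) (nd : List Char) (cl : Int) (ut : Option (List Char)) :
    pvAStep (nd, cl, ut, true) l = (nd ++ ['\n'], cl, ut, false) := by
  subst he
  have hs : PySem.Chars.strip ['@', 'E', 'N', 'D', 'C', 'O', 'D', 'E']
      = ['@', 'E', 'N', 'D', 'C', 'O', 'D', 'E'] := by decide
  have h1 : PySem.Chars.startswith ['@', 'E', 'N', 'D', 'C', 'O', 'D', 'E'] pvDefPrefix = false := by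
    decide
  have h2 : (['@', 'E', 'N', 'D', 'C', 'O', 'D', 'E'] : List Char) ≠ ['@', 'C', 'O', 'D', 'E'] := by
    decide
  have h3 : PySem.Chars.startswith ([] : List Char) ['#'] = false := by decide
  simp [pvAStep, hs, h1, h2, h3]

lemma pvStep_code_line {l : List Char} (hsl : PySem.Chars.strip l = l)
    (hdef : PySem.Chars.startswith l pvDefPrefix = false)
    (hc : l ≠ "@CODE".toList) (he : l ≠ "@ENDCODE".toList)
    (nd : List Char) (k : Int) (ut : Option (List Char)) :
    pvAStep (nd, k, ut, true) l = (nd ++ pvFmtCodeLine (k, l) ++ ['\n'], k + 1, ut, true) := by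
  have hl := pv_lstrip_of_strip hsl
  have hc' : l ≠ ['@', 'C', 'O', 'D', 'E'] := by simpa using hc
  have he' : l ≠ ['@', 'E', 'N', 'D', 'C', 'O', 'D', 'E'] := by simpa using he
  have hrep : PySem.Chars.lstrip (PySem.Chars.replace l ['\\', 'n'] ['\\', '\\', 'n'])
      = PySem.Chars.replace l ['\\', 'n'] ['\\', '\\', 'n'] := by
    simpa using pv_replace_lstrip hl
  by_cases hk : k = 0
  · simp [pvAStep, hsl, hdef, hc', he', hk, pvFmtCodeLine]
  · simp [pvAStep, hsl, hdef, hc', he', hk, pvFmtCodeLine, hrep, PySem.List.pyRepeat,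
      PySem.Int.truncdiv]

lemma pvStep_text {l : List Char} (hsl : PySem.Chars.strip l = l)
    (hdef : PySem.Chars.startswith l pvDefPrefix = false)
    (hc : l ≠ "@CODE".toList) (nd : List Char) (k : Int) (ut : Option (List Char)) :
    pvAStep (nd, k, ut, false) l
      = (nd ++ pvFmtTextLine l ++ ['\n'], k,
         (if PySem.Chars.startswith l ['#'] then some (PySem.Chars.lower (pvPartitionAfterSpace l)) else ut),
         false) := by
  have hc' : l ≠ ['@', 'C', 'O', 'D', 'E'] := by simpa using hc
  by_cases hh : PySem.Chars.startswith l ['#'] <;>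
    simp [pvAStep, hsl, hdef, hc', pvFmtTextLine, hh]

-- the master invariant: A's fold from code/text mode versus B's run-collecting recursion
lemma pvMaster : ∀ (n : Nat) (ls : List (List Char)), ls.length ≤ n →
    (∀ l ∈ ls, PySem.Chars.strip l = l) →
    ((∀ (nd : List Char) (ut : Option (List Char)) (acc : List (List Char)),
        (List.foldl pvAStep (nd ++ pvFlat (pvFmtCode acc false), ((acc.length : Int), ut, true)) ls).1
          = nd ++ pvFlat (pvCode (ls.filter pvKeep) acc))
     ∧ (∀ (nd : List Char) (cnt : Int) (ut : Option (List Char)) (acc : List (List Char)),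
        (List.foldl pvAStep (nd ++ pvFlat (pvFmtText acc), (cnt, ut, false)) ls).1
          = nd ++ pvFlat (pvText (ls.filter pvKeep) acc))) := by
  intro n
  induction n with
  | zero =>
    intro ls hlen hstrip
    cases ls with
    | nil =>
      constructor
      · intro nd ut acc; simp [pvCode]
      · intro nd cnt ut acc; simp [pvText]
    | cons l rest => simp at hlen
  | succ n ih =>
    intro ls hlen hstrip
    cases ls with
    | nil =>
      constructor
      · intro nd ut acc; simp [pvCode]
      · intro nd cnt ut acc; simp [pvText]
    | cons l rest =>
      have hlr : rest.length ≤ n := by simp at hlen; omega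
      have hsl : PySem.Chars.strip l = l := hstrip l (List.mem_cons_self ..)
      have hsr : ∀ x ∈ rest, PySem.Chars.strip x = x :=
        fun x hx => hstrip x (List.mem_cons_of_mem _ hx)
      have IH := ih rest hlr hsr
      by_cases hdef : PySem.Chars.startswith l pvDefPrefix
      · have hfil : (l :: rest).filter pvKeep = rest.filter pvKeep := by
          simp [List.filter_cons, pvKeep, hdef]
        refine ⟨fun nd ut acc => ?_, fun nd cnt ut acc => ?_⟩
        · rw [List.foldl_cons, pvStep_skip hsl hdef, hfil]
          exact IH.1 nd ut acc
        · rw [List.foldl_cons, pvStep_skip hsl hdef, hfil]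
          exact IH.2 nd cnt ut acc
      · have hdef' : PySem.Chars.startswith l pvDefPrefix = false := by
          simpa using hdef
        have hfil : (l :: rest).filter pvKeep = l :: rest.filter pvKeep := by
          simp [List.filter_cons, pvKeep, hdef']
        by_cases hc : l = "@CODE".toList
        · refine ⟨fun nd ut acc => ?_, fun nd cnt ut acc => ?_⟩
          · rw [List.foldl_cons, pvStep_code_enter hsl hc, hfil, hc]
            rw [show pvCode ("@CODE".toList :: rest.filter pvKeep) acc
                  = pvFmtCode acc false ++ pvCode (rest.filter pvKeep) [] from by simp [pvCode]]
            rw [pvFlat_append, ← List.append_assoc]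
            have h := IH.1 (nd ++ pvFlat (pvFmtCode acc false)) ut []
            simp only [pvFmtCode_nil_false, pvFlat_nil, List.append_nil, List.length_nil,
              Nat.cast_zero] at h
            exact h
          · rw [List.foldl_cons, pvStep_code_enter hsl hc, hfil, hc]
            rw [show pvText ("@CODE".toList :: rest.filter pvKeep) acc
                  = pvFmtText acc ++ pvCode (rest.filter pvKeep) [] from by simp [pvText]]
            rw [pvFlat_append, ← List.append_assoc]
            have h := IH.1 (nd ++ pvFlat (pvFmtText acc)) ut []
            simp only [pvFmtCode_nil_false, pvFlat_nil, List.append_nil, List.length_nil,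
              Nat.cast_zero] at h
            exact h
        · have hc' : l ≠ ['@', 'C', 'O', 'D', 'E'] := by simpa using hc
          refine ⟨fun nd ut acc => ?_, fun nd cnt ut acc => ?_⟩
          · by_cases he : l = "@ENDCODE".toList
            · rw [List.foldl_cons, pvStep_endcode hsl he, hfil, he]
              rw [show pvCode ("@ENDCODE".toList :: rest.filter pvKeep) acc
                    = pvFmtCode acc true ++ pvGo (rest.filter pvKeep) from by
                  simp [pvCode,
            show (['@', 'E', 'N', 'D', 'C', 'O', 'D', 'E'] : List Char) ≠ ['@', 'C', 'O', 'D', 'E']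
              from by decide]]
              rw [pvGo_eq_text, pvFmtCode_true, pvFlat_append, pvFlat_append, pvFlat_single]
              have h := IH.2 (nd ++ pvFlat (pvFmtCode acc false) ++ ['\n']) (acc.length : Int) ut []
              simp only [pvFmtText_nil, pvFlat_nil, List.append_nil] at h
              rw [h]
              simp
            · have he' : l ≠ ['@', 'E', 'N', 'D', 'C', 'O', 'D', 'E'] := by simpa using he
              rw [List.foldl_cons, pvStep_code_line hsl hdef' hc he, hfil]
              rw [show pvCode (l :: rest.filter pvKeep) acc
                    = pvCode (rest.filter pvKeep) (acc ++ [l]) from by simp [pvCode, hc', he']]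
              have h := IH.1 nd ut (acc ++ [l])
              simp only [pvFmtCode_snoc, pvFlat_append, pvFlat_single, List.length_append,
                List.length_cons, List.length_nil, Nat.cast_add, Nat.cast_one, Nat.cast_zero,
                List.append_assoc, zero_add] at h ⊢
              exact h
          · rw [List.foldl_cons, pvStep_text hsl hdef' hc, hfil]
            rw [show pvText (l :: rest.filter pvKeep) acc
                  = pvText (rest.filter pvKeep) (acc ++ [l]) from by simp [pvText, hc']]
            have h := IH.2 nd cnt
              (if PySem.Chars.startswith l ['#'] then some (PySem.Chars.lower (pvPartitionAfterSpace l)) else ut)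
              (acc ++ [l])
            simp only [pvFmtText_snoc, pvFlat_append, pvFlat_single, List.append_assoc] at h ⊢
            exact h

-- ===== VERDICT (by name: the statement is the Claim_ definition above) =====
theorem PatchDocStringGeneric_py_spec : Claim_equal_PatchDocStringGeneric_py := by
  intro D _
  show PatchDocStringGeneric_py D = PatchDocStringGeneric_py_alt D
  simp only [PatchDocStringGeneric_py, PatchDocStringGeneric_py_alt]
  have hfun : (fun (a : List Char × Int × Option (List Char) × Bool) x =>
      pvAStep a (PySem.Chars.strip x)) = pvAStep := by
    funext a x; exact pvAStep_strip a x
  have h1 : (PySem.Chars.splitOn D.toList "\n".toList).foldl pvAStep ([], ((0 : Int), none, false))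
      = ((PySem.Chars.splitOn D.toList "\n".toList).map PySem.Chars.strip).foldl pvAStep
          ([], ((0 : Int), none, false)) := by
    rw [List.foldl_map, hfun]
  have h2 : (((PySem.Chars.splitOn D.toList "\n".toList).map PySem.Chars.strip).foldl pvAStep
        ([], ((0 : Int), none, false))).1
      = [] ++ pvFlat (pvText (((PySem.Chars.splitOn D.toList "\n".toList).map PySem.Chars.strip).filter pvKeep) []) :=
    (pvMaster ((PySem.Chars.splitOn D.toList "\n".toList).map PySem.Chars.strip).length _ le_rfl
      (by
        intro x hx
        obtain ⟨y, _, rfl⟩ := List.mem_map.mp hx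
        exact pv_strip_idem y)).2 [] 0 none []
  have hkeep : ((PySem.Chars.splitOn D.toList "\n".toList).map PySem.Chars.strip).filter
        (fun l => !PySem.Chars.startswith l pvDefPrefix)
      = ((PySem.Chars.splitOn D.toList "\n".toList).map PySem.Chars.strip).filter pvKeep := rfl
  rw [hkeep, pv_join_nil, pvGo_eq_text, h1, h2]
  simp [pvFlat]
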